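-- pv_equiv track=rewrite | github.com/Jin-sjh/Flux_Lensa2026 | inputable/services/user_model.py | compute_cefr
-- ===== SOURCE A (Python) =====
-- PLACEMENT_WORDS = {
--     "A1": ["makan", "rumah", "besar", "pergi"],
--     "A2": ["sudah", "sedang", "kalau", "karena"],
--     "B1": ["meskipun", "sehingga"],
-- }
--
-- def compute_cefr(known_words: list[str]) -> str:
--     """Compute CEFR level from placement test results.
--     Empty list returns 'A1' (skip-test path).
--     """
--     known = set(known_words)
--     a1_score = sum(1 for w in PLACEMENT_WORDS["A1"] if w in known)
--     a2_score = sum(1 for w in PLACEMENT_WORDS["A2"] if w in known)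
--     b1_score = sum(1 for w in PLACEMENT_WORDS["B1"] if w in known)
--
--     if a1_score >= 3 and a2_score >= 2 and b1_score >= 1:
--         return "B1"
--     elif a1_score >= 3 and a2_score >= 2:
--         return "A2"
--     else:
--         return "A1"
-- ===== SOURCE B (Python) =====
-- PLACEMENT_WORDS = {
--     "A1": ["makan", "rumah", "besar", "pergi"],
--     "A2": ["sudah", "sedang", "kalau", "karena"],
--     "B1": ["meskipun", "sehingga"],
-- }
--
-- WORD_LEVEL = {w: lvl for lvl, ws in PLACEMENT_WORDS.items() for w in ws}
--
-- def compute_cefr(known_words: list[str]) -> str: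
--     """Single pass over the distinct known words through an inverted
--     word->level index, instead of scanning each level's word list."""
--     a1 = a2 = b1 = 0
--     for w in set(known_words):
--         lvl = WORD_LEVEL.get(w)
--         if lvl == "A1":
--             a1 += 1
--         elif lvl == "A2":
--             a2 += 1
--         elif lvl == "B1":
--             b1 += 1
--     if a1 >= 3 and a2 >= 2 and b1 >= 1:
--         return "B1"
--     if a1 >= 3 and a2 >= 2:
--         return "A2"
--     return "A1"
-- ===== Notes on version B (the rewrite author's own statement) =====
-- stated objective: alternative
-- what changed: Replaces A's three per-level scans testing membership in the known-word set by one pass over the distinct known words through an inverted word->level dictionary, incrementing per-level counters.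
import Mathlib
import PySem

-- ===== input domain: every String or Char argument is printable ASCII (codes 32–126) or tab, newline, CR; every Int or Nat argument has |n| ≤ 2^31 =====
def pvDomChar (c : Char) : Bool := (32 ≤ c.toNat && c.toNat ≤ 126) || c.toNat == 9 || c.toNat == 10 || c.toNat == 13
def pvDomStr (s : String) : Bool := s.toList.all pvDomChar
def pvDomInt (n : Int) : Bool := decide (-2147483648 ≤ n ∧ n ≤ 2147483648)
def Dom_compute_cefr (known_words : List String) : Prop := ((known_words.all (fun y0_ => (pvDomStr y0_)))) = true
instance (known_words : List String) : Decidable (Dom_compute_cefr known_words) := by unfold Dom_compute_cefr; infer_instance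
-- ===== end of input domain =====

-- B replaces A's three per-level membership scans by one pass over the distinct known
-- words through an inverted word->level dictionary (objective: alternative decomposition).

-- ===== PORT A =====
def placementA1 : List String := ["makan", "rumah", "besar", "pergi"]
def placementA2 : List String := ["sudah", "sedang", "kalau", "karena"]
def placementB1 : List String := ["meskipun", "sehingga"]

def compute_cefr (known_words : List String) : String :=
  let known : PySem.Set String := PySem.Set.ofList known_words
  let a1_score : Int := placementA1.foldl (fun acc w => if PySem.Set.contains known w then acc + 1 else acc) 0
  let a2_score : Int := placementA2.foldl (fun acc w => if PySem.Set.contains known w then acc + 1 else acc) 0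
  let b1_score : Int := placementB1.foldl (fun acc w => if PySem.Set.contains known w then acc + 1 else acc) 0
  if a1_score ≥ 3 ∧ a2_score ≥ 2 ∧ b1_score ≥ 1 then "B1"
  else if a1_score ≥ 3 ∧ a2_score ≥ 2 then "A2"
  else "A1"

-- ===== PORT B =====
def wordLevel : PySem.Dict String String :=
  PySem.Dict.ofList [("makan", "A1"), ("rumah", "A1"), ("besar", "A1"), ("pergi", "A1"),
                     ("sudah", "A2"), ("sedang", "A2"), ("kalau", "A2"), ("karena", "A2"),
                     ("meskipun", "B1"), ("sehingga", "B1")]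

def cefrStep (acc : Int × Int × Int) (w : String) : Int × Int × Int :=
  match PySem.Dict.get? wordLevel w with
  | some lvl =>
      if lvl == "A1" then (acc.1 + 1, acc.2.1, acc.2.2)
      else if lvl == "A2" then (acc.1, acc.2.1 + 1, acc.2.2)
      else if lvl == "B1" then (acc.1, acc.2.1, acc.2.2 + 1)
      else acc
  | none => acc

def compute_cefr_alt (known_words : List String) : String :=
  let c : Int × Int × Int := (PySem.Set.ofList known_words).foldl cefrStep (0, 0, 0)
  if c.1 ≥ 3 ∧ c.2.1 ≥ 2 ∧ c.2.2 ≥ 1 then "B1"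
  else if c.1 ≥ 3 ∧ c.2.1 ≥ 2 then "A2"
  else "A1"

-- ===== PRECONDITION & SPEC =====
def Spec_compute_cefr (known_words : List String) (out : String) : Prop := out = compute_cefr_alt known_words
instance (known_words : List String) (out : String) : Decidable (Spec_compute_cefr known_words out) := by unfold Spec_compute_cefr; infer_instance

-- ===== CLAIM (what is proved, stated in full; the proofs are below) =====
def Claim_equal_compute_cefr : Prop := ∀ (known_words : List String), Dom_compute_cefr known_words → Spec_compute_cefr known_words (compute_cefr known_words)

-- ===== LEMMAS AND PROOFS =====

-- A's counting loop is countP of membership.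
theorem foldl_if_count (p : String → Bool) (l : List String) (n : Int) :
    l.foldl (fun acc w => if p w then acc + 1 else acc) n = n + (l.countP p : Int) := by
  induction l generalizing n with
  | nil => simp
  | cons x xs ih =>
      by_cases h : p x <;> simp [List.countP_cons, h, ih] <;> push_cast <;> ring

-- B's single pass computes the three countP's of the inverted-index predicates.
theorem foldl_cefrStep (l : List String) (acc : Int × Int × Int) :
    l.foldl cefrStep acc =
      (acc.1 + (l.countP (fun w => PySem.Dict.get? wordLevel w == some "A1") : Int),
       acc.2.1 + (l.countP (fun w => PySem.Dict.get? wordLevel w == some "A2") : Int),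
       acc.2.2 + (l.countP (fun w => PySem.Dict.get? wordLevel w == some "B1") : Int)) := by
  induction l generalizing acc with
  | nil => simp
  | cons x xs ih =>
      simp only [List.foldl_cons, ih, List.countP_cons]
      rcases h : PySem.Dict.get? wordLevel x with _ | lvl <;>
        simp only [cefrStep, h] <;>
        [skip; split_ifs with h1 h2 h3] <;>
        simp_all <;> push_cast <;> ring_nf <;> simp_all

-- The inverted index agrees with the per-level word lists.
theorem wordLevel_A1 (w : String) :
    (PySem.Dict.get? wordLevel w == some "A1") = decide (w ∈ placementA1) := by
  rw [show wordLevel = PySem.Dict.mk [("makan", "A1"), ("rumah", "A1"), ("besar", "A1"),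
        ("pergi", "A1"), ("sudah", "A2"), ("sedang", "A2"), ("kalau", "A2"), ("karena", "A2"),
        ("meskipun", "B1"), ("sehingga", "B1")] from by decide]
  simp only [placementA1]
  simp only [PySem.Dict.get?, List.find?_cons, List.find?_nil, beq_eq_decide,
    List.mem_cons, List.not_mem_nil, or_false]
  by_cases h0 : "makan" = w <;> by_cases h1 : "rumah" = w <;> by_cases h2 : "besar" = w <;> by_cases h3 : "pergi" = w <;> by_cases h4 : "sudah" = w <;> by_cases h5 : "sedang" = w <;> by_cases h6 : "kalau" = w <;> by_cases h7 : "karena" = w <;> by_cases h8 : "meskipun" = w <;> by_cases h9 : "sehingga" = w <;> (try subst w) <;> simp_all [eq_comm]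

theorem wordLevel_A2 (w : String) :
    (PySem.Dict.get? wordLevel w == some "A2") = decide (w ∈ placementA2) := by
  rw [show wordLevel = PySem.Dict.mk [("makan", "A1"), ("rumah", "A1"), ("besar", "A1"),
        ("pergi", "A1"), ("sudah", "A2"), ("sedang", "A2"), ("kalau", "A2"), ("karena", "A2"),
        ("meskipun", "B1"), ("sehingga", "B1")] from by decide]
  simp only [placementA2]
  simp only [PySem.Dict.get?, List.find?_cons, List.find?_nil, beq_eq_decide,
    List.mem_cons, List.not_mem_nil, or_false]
  by_cases h0 : "makan" = w <;> by_cases h1 : "rumah" = w <;> by_cases h2 : "besar" = w <;> by_cases h3 : "pergi" = w <;> by_cases h4 : "sudah" = w <;> by_cases h5 : "sedang" = w <;> by_cases h6 : "kalau" = w <;> by_cases h7 : "karena" = w <;> by_cases h8 : "meskipun" = w <;> by_cases h9 : "sehingga" = w <;> (try subst w) <;> simp_all [eq_comm]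

theorem wordLevel_B1 (w : String) :
    (PySem.Dict.get? wordLevel w == some "B1") = decide (w ∈ placementB1) := by
  rw [show wordLevel = PySem.Dict.mk [("makan", "A1"), ("rumah", "A1"), ("besar", "A1"),
        ("pergi", "A1"), ("sudah", "A2"), ("sedang", "A2"), ("kalau", "A2"), ("karena", "A2"),
        ("meskipun", "B1"), ("sehingga", "B1")] from by decide]
  simp only [placementB1]
  simp only [PySem.Dict.get?, List.find?_cons, List.find?_nil, beq_eq_decide,
    List.mem_cons, List.not_mem_nil, or_false]
  by_cases h0 : "makan" = w <;> by_cases h1 : "rumah" = w <;> by_cases h2 : "besar" = w <;> by_cases h3 : "pergi" = w <;> by_cases h4 : "sudah" = w <;> by_cases h5 : "sedang" = w <;> by_cases h6 : "kalau" = w <;> by_cases h7 : "karena" = w <;> by_cases h8 : "meskipun" = w <;> by_cases h9 : "sehingga" = w <;> (try subst w) <;> simp_all [eq_comm]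

-- Counting l₁-elements in l₂ = counting l₂-elements in l₁, for duplicate-free lists.
theorem countP_mem_swap (l₁ l₂ : List String) (h₁ : l₁.Nodup) (h₂ : l₂.Nodup) :
    l₁.countP (fun w => decide (w ∈ l₂)) = l₂.countP (fun w => decide (w ∈ l₁)) := by
  rw [List.countP_eq_length_filter, List.countP_eq_length_filter]
  apply List.Perm.length_eq
  rw [List.perm_ext_iff_of_nodup (h₁.filter _) (h₂.filter _)]
  intro a
  simp [List.mem_filter]
  tauto

-- ===== VERDICT (by name: the statement is the Claim_ definition above) =====
theorem compute_cefr_spec : Claim_equal_compute_cefr := by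
  intro known_words _
  unfold Spec_compute_cefr compute_cefr compute_cefr_alt
  have hs : (PySem.Set.ofList known_words).Nodup := PySem.Set.nodup_ofList known_words
  have hc : (fun w => PySem.Set.contains (PySem.Set.ofList known_words) w)
      = fun w => decide (w ∈ PySem.Set.ofList known_words) := by
    funext w
    by_cases h : w ∈ PySem.Set.ofList known_words <;>
      simp [h, PySem.Set.contains_iff]
  have e1 : (placementA1.countP (fun w => decide (w ∈ PySem.Set.ofList known_words)) : Int)
      = ((PySem.Set.ofList known_words).countP (fun w => PySem.Dict.get? wordLevel w == some "A1") : Int) := by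
    rw [countP_mem_swap _ _ (by decide) hs]
    exact congrArg _ (List.countP_congr (fun w _ => by rw [wordLevel_A1]))
  have e2 : (placementA2.countP (fun w => decide (w ∈ PySem.Set.ofList known_words)) : Int)
      = ((PySem.Set.ofList known_words).countP (fun w => PySem.Dict.get? wordLevel w == some "A2") : Int) := by
    rw [countP_mem_swap _ _ (by decide) hs]
    exact congrArg _ (List.countP_congr (fun w _ => by rw [wordLevel_A2]))
  have e3 : (placementB1.countP (fun w => decide (w ∈ PySem.Set.ofList known_words)) : Int)
      = ((PySem.Set.ofList known_words).countP (fun w => PySem.Dict.get? wordLevel w == some "B1") : Int) := by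
    rw [countP_mem_swap _ _ (by decide) hs]
    exact congrArg _ (List.countP_congr (fun w _ => by rw [wordLevel_B1]))
  simp only [hc, foldl_if_count, foldl_cefrStep, zero_add, e1, e2, e3]
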